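-- pv_equiv track=rewrite | github.com/uclouvain/osis-internship | internship/views/affectation_statistics.py | get_double_available_periods_of_student
-- ===== SOURCE A (Python) =====
-- periods_dict = {'P1': True, 'P2': True, 'P3': True, 'P4': True, 'P5': True, 'P6': True, 'P7': True, 'P8': True,
--                 'P9': False, 'P10': False, 'P11': False, 'P12': False}
--
-- def get_number_of_period(period):
--     return int(period.replace("P", ""))
--
-- def get_next_period(period):
--     return "P" + str((get_number_of_period(period) + 1))
--
-- def get_double_available_periods_of_student(student_solution, mandatory):
--     """
--     This method is used to find suitable periods of the student for the speciality 'Emergency'.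
--     We need to find all consecutive periods of the students that are still free.
--     :param student_solution: solution of the student(a dict where the key represent the id of the period and
--     the value represents an InternshipEnrollment )
--     :param mandatory: Specify the type of periods to check
--     :return: the set of available double periods of the student
--     """
--     available_periods = set()
--     for period, is_mandatory in periods_dict.items():
--         if mandatory == is_mandatory:
--             # Check if period is not present in the solution
--             if period not in student_solution:
--                 next_period = get_next_period(period)
--                 # Check if period + 1 is not present in the solution and if the types of periods are the same
--                 if get_number_of_period(period) + 1 <= len(periods_dict) and next_period not in student_solution:
--                     if periods_dict[next_period] == mandatory:
--                         available_periods.add((period, next_period))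
--     return available_periods
-- ===== SOURCE B (Python) =====
-- def get_double_available_periods_of_student(student_solution, mandatory):
--     # The period table is two contiguous blocks: P1..P8 mandatory, P9..P12 not.
--     # So enumerate the adjacent index pairs of the requested block directly.
--     start, stop = (1, 8) if mandatory else (9, 12)
--     return {("P" + str(i), "P" + str(i + 1))
--             for i in range(start, stop)
--             if "P" + str(i) not in student_solution
--             and "P" + str(i + 1) not in student_solution}
-- ===== Notes on version B (the rewrite author's own statement) =====
-- stated objective: simpler
-- what changed: B drops the period table entirely: it exploits that the table is two contiguous blocks (P1..P8 mandatory, P9..P12 not) and directly enumerates the adjacent numeric index pairs of the requested block (range(1,8) or range(9,12)), keeping a pair when neither period is in the solution; no dict iteration, no table lookups, no length bound.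
import Mathlib
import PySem

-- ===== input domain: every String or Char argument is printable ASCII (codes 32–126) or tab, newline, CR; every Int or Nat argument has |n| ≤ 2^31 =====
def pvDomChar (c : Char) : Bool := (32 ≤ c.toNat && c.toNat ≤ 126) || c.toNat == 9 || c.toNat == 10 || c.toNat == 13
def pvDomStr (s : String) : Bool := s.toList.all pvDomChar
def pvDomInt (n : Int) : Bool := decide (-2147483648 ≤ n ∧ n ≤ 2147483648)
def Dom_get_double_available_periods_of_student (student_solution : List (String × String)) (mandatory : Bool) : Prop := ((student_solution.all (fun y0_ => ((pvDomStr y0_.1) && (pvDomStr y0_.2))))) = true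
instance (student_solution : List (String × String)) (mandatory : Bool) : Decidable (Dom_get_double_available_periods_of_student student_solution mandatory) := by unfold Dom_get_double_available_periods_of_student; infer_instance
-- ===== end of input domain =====

-- B drops the period table: it enumerates the adjacent numeric index pairs of the requested
-- contiguous block (range(1,8) or range(9,12)) directly; simpler, return values proved equal.

-- ===== PORT A =====
def periodsDict : List (String × Bool) :=
  [("P1", true), ("P2", true), ("P3", true), ("P4", true), ("P5", true), ("P6", true),
   ("P7", true), ("P8", true), ("P9", false), ("P10", false), ("P11", false), ("P12", false)]

-- int(period.replace("P", "")): every caller passes "P<digits>", where ofStr? is some, so getD 0 is unreachable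
def get_number_of_period (period : String) : Int :=
  (PySem.Int.ofStr? (PySem.Str.replace period "P" "")).getD 0

def get_next_period (period : String) : String :=
  "P" ++ PySem.Int.toStr (get_number_of_period period + 1)

def get_double_available_periods_of_student (student_solution : List (String × String)) (mandatory : Bool) : List (String × String) :=
  periodsDict.foldl (fun available_periods pm =>
    if mandatory == pm.2 then
      if !((PySem.Dict.mk student_solution).contains pm.1) then
        let next_period := get_next_period pm.1
        if decide (get_number_of_period pm.1 + 1 ≤ ((PySem.Dict.mk periodsDict).size : Int)) &&
            !((PySem.Dict.mk student_solution).contains next_period) then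
          -- periods_dict[next_period]: the guard ensures the key is present, so getD false is exact here
          if (PySem.Dict.mk periodsDict).getD next_period false == mandatory then
            PySem.Set.add available_periods (pm.1, next_period)
          else available_periods
        else available_periods
      else available_periods
    else available_periods) PySem.Set.empty

-- ===== PORT B =====
def get_double_available_periods_of_student_alt (student_solution : List (String × String)) (mandatory : Bool) : List (String × String) :=
  let startstop : Int × Int := if mandatory then (1, 8) else (9, 12)
  PySem.Set.ofList ((PySem.List.pyRange startstop.1 startstop.2 1).filterMap (fun i =>
    if !((PySem.Dict.mk student_solution).contains ("P" ++ PySem.Int.toStr i)) &&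
        !((PySem.Dict.mk student_solution).contains ("P" ++ PySem.Int.toStr (i + 1))) then
      some ("P" ++ PySem.Int.toStr i, "P" ++ PySem.Int.toStr (i + 1))
    else none))

-- ===== PRECONDITION & SPEC =====
def Spec_get_double_available_periods_of_student (student_solution : List (String × String)) (mandatory : Bool) (out : List (String × String)) : Prop := out = get_double_available_periods_of_student_alt student_solution mandatory
instance (student_solution : List (String × String)) (mandatory : Bool) (out : List (String × String)) : Decidable (Spec_get_double_available_periods_of_student student_solution mandatory out) := by unfold Spec_get_double_available_periods_of_student; infer_instance

-- ===== CLAIM (what is proved, stated in full; the proofs are below) =====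
def Claim_equal_get_double_available_periods_of_student : Prop := ∀ (student_solution : List (String × String)) (mandatory : Bool), Dom_get_double_available_periods_of_student student_solution mandatory → Spec_get_double_available_periods_of_student student_solution mandatory (get_double_available_periods_of_student student_solution mandatory)

-- ===== LEMMAS AND PROOFS =====

-- the fused condition of A's single loop
def pvCondA (student_solution : List (String × String)) (mandatory : Bool) (pm : String × Bool) : Bool :=
  (mandatory == pm.2) && !((PySem.Dict.mk student_solution).contains pm.1) &&
  (decide (get_number_of_period pm.1 + 1 ≤ ((PySem.Dict.mk periodsDict).size : Int)) &&
    !((PySem.Dict.mk student_solution).contains (get_next_period pm.1))) &&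
  ((PySem.Dict.mk periodsDict).getD (get_next_period pm.1) false == mandatory)

-- A's Set.add-loop over rows with distinct keys appends, i.e. it is a filter-and-map
lemma pv_foldl_add (student_solution : List (String × String)) (mandatory : Bool) :
    ∀ (l : List (String × Bool)) (acc : List (String × String)),
      (l.map Prod.fst).Nodup →
      (∀ x ∈ acc, ∀ pm ∈ l, x.1 ≠ pm.1) →
      l.foldl (fun a pm => if pvCondA student_solution mandatory pm then PySem.Set.add a (pm.1, get_next_period pm.1) else a) acc
        = acc ++ (l.filter (pvCondA student_solution mandatory)).map (fun pm => (pm.1, get_next_period pm.1)) := by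
  intro l
  induction l with
  | nil => intro acc _ _; simp
  | cons hd tl ih =>
    intro acc hnd hacc
    simp only [List.map_cons, List.nodup_cons] at hnd
    simp only [List.foldl_cons, List.filter_cons]
    by_cases hc : pvCondA student_solution mandatory hd = true
    · rw [if_pos hc, if_pos hc]
      have hadd : PySem.Set.add acc (hd.1, get_next_period hd.1) = acc ++ [(hd.1, get_next_period hd.1)] := by
        unfold PySem.Set.add PySem.Set.contains
        rw [if_neg]
        simp only [List.contains_eq_mem, decide_eq_true_eq]
        intro hmem
        exact hacc _ hmem hd (List.mem_cons_self) rfl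
      rw [hadd, ih (acc ++ [(hd.1, get_next_period hd.1)]) hnd.2]
      · simp
      · intro x hx pm hpm
        rcases List.mem_append.1 hx with hx | hx
        · exact hacc x hx pm (List.mem_cons_of_mem _ hpm)
        · simp only [List.mem_singleton] at hx
          subst hx
          intro h
          exact hnd.1 (h ▸ List.mem_map_of_mem hpm)
    · rw [if_neg hc, if_neg hc]
      exact ih acc hnd.2 (fun x hx pm hpm => hacc x hx pm (List.mem_cons_of_mem _ hpm))

-- A's loop body, with the nested ifs fused into one condition
lemma pv_body_eq (student_solution : List (String × String)) (mandatory : Bool)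
    (a : List (String × String)) (pm : String × Bool) :
    (if mandatory == pm.2 then
      if !((PySem.Dict.mk student_solution).contains pm.1) then
        let next_period := get_next_period pm.1
        if decide (get_number_of_period pm.1 + 1 ≤ ((PySem.Dict.mk periodsDict).size : Int)) &&
            !((PySem.Dict.mk student_solution).contains next_period) then
          if (PySem.Dict.mk periodsDict).getD next_period false == mandatory then
            PySem.Set.add a (pm.1, next_period)
          else a
        else a
      else a
    else a)
      = if pvCondA student_solution mandatory pm then PySem.Set.add a (pm.1, get_next_period pm.1) else a := by
  by_cases h3 : (get_number_of_period pm.1 + 1 ≤ ((PySem.Dict.mk periodsDict).size : Int)) <;>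
    cases h1 : (mandatory == pm.2) <;>
    cases h2 : (PySem.Dict.mk student_solution).contains pm.1 <;>
    cases h4 : (PySem.Dict.mk student_solution).contains (get_next_period pm.1) <;>
    cases h5 : ((PySem.Dict.mk periodsDict).getD (get_next_period pm.1) false == mandatory) <;>
    simp [pvCondA, h1, h2, h3, h4, h5]

lemma pv_A_eq (student_solution : List (String × String)) (mandatory : Bool) :
    get_double_available_periods_of_student student_solution mandatory
      = (periodsDict.filter (pvCondA student_solution mandatory)).map (fun pm => (pm.1, get_next_period pm.1)) := by
  unfold get_double_available_periods_of_student
  rw [show PySem.Set.empty = ([] : List (String × String)) from rfl]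
  rw [PySem.List.foldl_congr_mem periodsDict _ _ _ (fun a pm _ => pv_body_eq student_solution mandatory a pm)]
  rw [pv_foldl_add student_solution mandatory periodsDict [] (by decide) (by simp)]
  simp

-- filterMap of an if-some/none body is filter-then-map
lemma pv_filterMap_if {α β : Type} (q : α → Bool) (f : α → β) :
    ∀ l : List α, l.filterMap (fun x => if q x then some (f x) else none) = (l.filter q).map f := by
  intro l
  induction l with
  | nil => rfl
  | cons hd tl ih =>
    by_cases h : q hd = true <;>
      simp [List.filterMap_cons, h, ih]

-- a conditional-cons builder that both filter-maps reduce to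
def pvBuild {γ : Type} (conds : List (Bool × γ)) : List γ :=
  conds.foldr (fun cv acc => if cv.1 then cv.2 :: acc else acc) []

lemma pvBuild_cons {γ : Type} (c : Bool) (x : γ) (l : List (Bool × γ)) :
    pvBuild ((c, x) :: l) = if c then x :: pvBuild l else pvBuild l := rfl

lemma pv_build_eq {α γ : Type} (p : α → Bool) (g : α → γ) :
    ∀ l : List α, (l.filter p).map g = pvBuild (l.map (fun x => (p x, g x))) := by
  intro l
  induction l with
  | nil => rfl
  | cons hd tl ih =>
    by_cases h : p hd = true <;>
      simp [List.filter_cons, pvBuild_cons, h, ih]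


-- per-row evaluations of A's fused condition (the table part is closed, only contains-tests remain)
lemma condA_mismatch (ss : List (String × String)) (m : Bool) (pm : String × Bool)
    (h : (m == pm.2) = false) : pvCondA ss m pm = false := by
  simp only [pvCondA, h, Bool.false_and]

lemma condA_P8 (ss : List (String × String)) : pvCondA ss true ("P8", true) = false := by
  simp only [pvCondA,
    show ((true : Bool) == true) = true from rfl,
    show get_next_period "P8" = "P9" from by decide,
    show (PySem.Dict.mk periodsDict).getD "P9" false = false from by decide,
    show ((false : Bool) == true) = false from rfl,
    Bool.true_and, Bool.and_false]

lemma condA_P12 (ss : List (String × String)) : pvCondA ss false ("P12", false) = false := by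
  simp only [pvCondA,
    show ((false : Bool) == false) = true from rfl,
    show decide (get_number_of_period "P12" + 1 ≤ ((PySem.Dict.mk periodsDict).size : Int)) = false from by decide,
    Bool.true_and, Bool.false_and, Bool.and_false]

lemma condA_P1 (ss : List (String × String)) :
    pvCondA ss true ("P1", true)
      = (!((PySem.Dict.mk ss).contains "P1") && !((PySem.Dict.mk ss).contains "P2")) := by
  simp only [pvCondA,
    show ((true : Bool) == true) = true from rfl,
    show get_next_period "P1" = "P2" from by decide,
    show (PySem.Dict.mk periodsDict).getD "P2" false = true from by decide,
    show decide (get_number_of_period "P1" + 1 ≤ ((PySem.Dict.mk periodsDict).size : Int)) = true from by decide,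
    Bool.true_and, Bool.and_true]

lemma condA_P2 (ss : List (String × String)) :
    pvCondA ss true ("P2", true)
      = (!((PySem.Dict.mk ss).contains "P2") && !((PySem.Dict.mk ss).contains "P3")) := by
  simp only [pvCondA,
    show ((true : Bool) == true) = true from rfl,
    show get_next_period "P2" = "P3" from by decide,
    show (PySem.Dict.mk periodsDict).getD "P3" false = true from by decide,
    show decide (get_number_of_period "P2" + 1 ≤ ((PySem.Dict.mk periodsDict).size : Int)) = true from by decide,
    Bool.true_and, Bool.and_true]

lemma condA_P3 (ss : List (String × String)) :
    pvCondA ss true ("P3", true)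
      = (!((PySem.Dict.mk ss).contains "P3") && !((PySem.Dict.mk ss).contains "P4")) := by
  simp only [pvCondA,
    show ((true : Bool) == true) = true from rfl,
    show get_next_period "P3" = "P4" from by decide,
    show (PySem.Dict.mk periodsDict).getD "P4" false = true from by decide,
    show decide (get_number_of_period "P3" + 1 ≤ ((PySem.Dict.mk periodsDict).size : Int)) = true from by decide,
    Bool.true_and, Bool.and_true]

lemma condA_P4 (ss : List (String × String)) :
    pvCondA ss true ("P4", true)
      = (!((PySem.Dict.mk ss).contains "P4") && !((PySem.Dict.mk ss).contains "P5")) := by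
  simp only [pvCondA,
    show ((true : Bool) == true) = true from rfl,
    show get_next_period "P4" = "P5" from by decide,
    show (PySem.Dict.mk periodsDict).getD "P5" false = true from by decide,
    show decide (get_number_of_period "P4" + 1 ≤ ((PySem.Dict.mk periodsDict).size : Int)) = true from by decide,
    Bool.true_and, Bool.and_true]

lemma condA_P5 (ss : List (String × String)) :
    pvCondA ss true ("P5", true)
      = (!((PySem.Dict.mk ss).contains "P5") && !((PySem.Dict.mk ss).contains "P6")) := by
  simp only [pvCondA,
    show ((true : Bool) == true) = true from rfl,
    show get_next_period "P5" = "P6" from by decide,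
    show (PySem.Dict.mk periodsDict).getD "P6" false = true from by decide,
    show decide (get_number_of_period "P5" + 1 ≤ ((PySem.Dict.mk periodsDict).size : Int)) = true from by decide,
    Bool.true_and, Bool.and_true]

lemma condA_P6 (ss : List (String × String)) :
    pvCondA ss true ("P6", true)
      = (!((PySem.Dict.mk ss).contains "P6") && !((PySem.Dict.mk ss).contains "P7")) := by
  simp only [pvCondA,
    show ((true : Bool) == true) = true from rfl,
    show get_next_period "P6" = "P7" from by decide,
    show (PySem.Dict.mk periodsDict).getD "P7" false = true from by decide,
    show decide (get_number_of_period "P6" + 1 ≤ ((PySem.Dict.mk periodsDict).size : Int)) = true from by decide,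
    Bool.true_and, Bool.and_true]

lemma condA_P7 (ss : List (String × String)) :
    pvCondA ss true ("P7", true)
      = (!((PySem.Dict.mk ss).contains "P7") && !((PySem.Dict.mk ss).contains "P8")) := by
  simp only [pvCondA,
    show ((true : Bool) == true) = true from rfl,
    show get_next_period "P7" = "P8" from by decide,
    show (PySem.Dict.mk periodsDict).getD "P8" false = true from by decide,
    show decide (get_number_of_period "P7" + 1 ≤ ((PySem.Dict.mk periodsDict).size : Int)) = true from by decide,
    Bool.true_and, Bool.and_true]

lemma condA_P9 (ss : List (String × String)) :
    pvCondA ss false ("P9", false)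
      = (!((PySem.Dict.mk ss).contains "P9") && !((PySem.Dict.mk ss).contains "P10")) := by
  simp only [pvCondA,
    show ((false : Bool) == false) = true from rfl,
    show get_next_period "P9" = "P10" from by decide,
    show (PySem.Dict.mk periodsDict).getD "P10" false = false from by decide,
    show decide (get_number_of_period "P9" + 1 ≤ ((PySem.Dict.mk periodsDict).size : Int)) = true from by decide,
    Bool.true_and, Bool.and_true]

lemma condA_P10 (ss : List (String × String)) :
    pvCondA ss false ("P10", false)
      = (!((PySem.Dict.mk ss).contains "P10") && !((PySem.Dict.mk ss).contains "P11")) := by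
  simp only [pvCondA,
    show ((false : Bool) == false) = true from rfl,
    show get_next_period "P10" = "P11" from by decide,
    show (PySem.Dict.mk periodsDict).getD "P11" false = false from by decide,
    show decide (get_number_of_period "P10" + 1 ≤ ((PySem.Dict.mk periodsDict).size : Int)) = true from by decide,
    Bool.true_and, Bool.and_true]

lemma condA_P11 (ss : List (String × String)) :
    pvCondA ss false ("P11", false)
      = (!((PySem.Dict.mk ss).contains "P11") && !((PySem.Dict.mk ss).contains "P12")) := by
  simp only [pvCondA,
    show ((false : Bool) == false) = true from rfl,
    show get_next_period "P11" = "P12" from by decide,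
    show (PySem.Dict.mk periodsDict).getD "P12" false = false from by decide,
    show decide (get_number_of_period "P11" + 1 ≤ ((PySem.Dict.mk periodsDict).size : Int)) = true from by decide,
    Bool.true_and, Bool.and_true]

-- ===== VERDICT (by name: the statement is the Claim_ definition above) =====
set_option maxHeartbeats 1000000 in
theorem get_double_available_periods_of_student_spec : Claim_equal_get_double_available_periods_of_student := by
  intro student_solution mandatory _
  unfold Spec_get_double_available_periods_of_student
  rw [pv_A_eq]
  unfold get_double_available_periods_of_student_alt
  cases mandatory
  case false =>
    simp only [Bool.false_eq_true, if_false]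
    rw [show PySem.List.pyRange (9:Int) 12 1 = [9, 10, 11] from by decide, pv_filterMap_if]
    rw [PySem.Set.ofList_eq_self_of_nodup _
      ((by decide : (([9, 10, 11] : List Int).map (fun i =>
          ("P" ++ PySem.Int.toStr i, "P" ++ PySem.Int.toStr (i + 1)))).Nodup).sublist
        (List.Sublist.map _ List.filter_sublist))]
    rw [show periodsDict = [("P1", true), ("P2", true), ("P3", true), ("P4", true), ("P5", true), ("P6", true), ("P7", true), ("P8", true)] ++ ([("P9", false), ("P10", false), ("P11", false)] ++ [("P12", false)]) from rfl]
    rw [List.filter_append, List.filter_append]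
    rw [show List.filter (pvCondA student_solution false) [("P1", true), ("P2", true), ("P3", true), ("P4", true), ("P5", true), ("P6", true), ("P7", true), ("P8", true)] = [] from by
      simp only [List.filter_cons, List.filter_nil,
        condA_mismatch student_solution false ("P1", true) rfl,
        condA_mismatch student_solution false ("P2", true) rfl,
        condA_mismatch student_solution false ("P3", true) rfl,
        condA_mismatch student_solution false ("P4", true) rfl,
        condA_mismatch student_solution false ("P5", true) rfl,
        condA_mismatch student_solution false ("P6", true) rfl,
        condA_mismatch student_solution false ("P7", true) rfl,
        condA_mismatch student_solution false ("P8", true) rfl,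
        Bool.false_eq_true, if_false]]
    rw [show List.filter (pvCondA student_solution false) [("P12", false)] = [] from by
      simp only [List.filter_cons, List.filter_nil, condA_P12, Bool.false_eq_true, if_false]]
    rw [List.nil_append, List.append_nil]
    rw [pv_build_eq, pv_build_eq]
    simp only [List.map_cons, List.map_nil]
    rw [condA_P9, condA_P10, condA_P11]
    simp only [show get_next_period "P9" = "P10" from by decide,
      show get_next_period "P10" = "P11" from by decide,
      show get_next_period "P11" = "P12" from by decide,
      show ("P" ++ PySem.Int.toStr (9:Int)) = "P9" from by decide,
      show ("P" ++ PySem.Int.toStr ((9:Int) + 1)) = "P10" from by decide,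
      show ("P" ++ PySem.Int.toStr (10:Int)) = "P10" from by decide,
      show ("P" ++ PySem.Int.toStr ((10:Int) + 1)) = "P11" from by decide,
      show ("P" ++ PySem.Int.toStr (11:Int)) = "P11" from by decide,
      show ("P" ++ PySem.Int.toStr ((11:Int) + 1)) = "P12" from by decide]
  case true =>
    simp only [if_true]
    rw [show PySem.List.pyRange (1:Int) 8 1 = [1, 2, 3, 4, 5, 6, 7] from by decide, pv_filterMap_if]
    rw [PySem.Set.ofList_eq_self_of_nodup _
      ((by decide : (([1, 2, 3, 4, 5, 6, 7] : List Int).map (fun i =>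
          ("P" ++ PySem.Int.toStr i, "P" ++ PySem.Int.toStr (i + 1)))).Nodup).sublist
        (List.Sublist.map _ List.filter_sublist))]
    rw [show periodsDict = [("P1", true), ("P2", true), ("P3", true), ("P4", true), ("P5", true), ("P6", true), ("P7", true)] ++ [("P8", true), ("P9", false), ("P10", false), ("P11", false), ("P12", false)] from rfl]
    rw [List.filter_append]
    rw [show List.filter (pvCondA student_solution true) [("P8", true), ("P9", false), ("P10", false), ("P11", false), ("P12", false)] = [] from by
      simp only [List.filter_cons, List.filter_nil, condA_P8,
        condA_mismatch student_solution true ("P9", false) rfl,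
        condA_mismatch student_solution true ("P10", false) rfl,
        condA_mismatch student_solution true ("P11", false) rfl,
        condA_mismatch student_solution true ("P12", false) rfl,
        Bool.false_eq_true, if_false]]
    rw [List.append_nil]
    rw [pv_build_eq, pv_build_eq]
    simp only [List.map_cons, List.map_nil]
    rw [condA_P1, condA_P2, condA_P3, condA_P4, condA_P5, condA_P6, condA_P7]
    simp only [show get_next_period "P1" = "P2" from by decide,
      show get_next_period "P2" = "P3" from by decide,
      show get_next_period "P3" = "P4" from by decide,
      show get_next_period "P4" = "P5" from by decide,
      show get_next_period "P5" = "P6" from by decide,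
      show get_next_period "P6" = "P7" from by decide,
      show get_next_period "P7" = "P8" from by decide,
      show ("P" ++ PySem.Int.toStr (1:Int)) = "P1" from by decide,
      show ("P" ++ PySem.Int.toStr ((1:Int) + 1)) = "P2" from by decide,
      show ("P" ++ PySem.Int.toStr (2:Int)) = "P2" from by decide,
      show ("P" ++ PySem.Int.toStr ((2:Int) + 1)) = "P3" from by decide,
      show ("P" ++ PySem.Int.toStr (3:Int)) = "P3" from by decide,
      show ("P" ++ PySem.Int.toStr ((3:Int) + 1)) = "P4" from by decide,
      show ("P" ++ PySem.Int.toStr (4:Int)) = "P4" from by decide,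
      show ("P" ++ PySem.Int.toStr ((4:Int) + 1)) = "P5" from by decide,
      show ("P" ++ PySem.Int.toStr (5:Int)) = "P5" from by decide,
      show ("P" ++ PySem.Int.toStr ((5:Int) + 1)) = "P6" from by decide,
      show ("P" ++ PySem.Int.toStr (6:Int)) = "P6" from by decide,
      show ("P" ++ PySem.Int.toStr ((6:Int) + 1)) = "P7" from by decide,
      show ("P" ++ PySem.Int.toStr (7:Int)) = "P7" from by decide,
      show ("P" ++ PySem.Int.toStr ((7:Int) + 1)) = "P8" from by decide]
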